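-- pv_equiv track=rewrite | github.com/Gorane7/aoc_2021 | python_parser.py | separate_symbol_end
-- ===== SOURCE A (Python) =====
-- def separate_symbol_end(data, start_symbol, end_symbol):
--     start_part = []
--     end_part = []
--     in_end_part = True
--     depth = 1
--     for i in range(len(data) - 2, -1, -1):
--         if in_end_part:
--             if data[i] == ["symbol", start_symbol]:
--                 depth -= 1
--             elif data[i] == ["symbol", end_symbol]:
--                 depth += 1
--             if depth == 0:
--                 in_end_part = False
--                 continue
--             end_part.append(data[i])
--         else:
--             start_part.append(data[i])
--     return start_part[::-1], end_part[::-1], not in_end_part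
-- ===== SOURCE B (Python) =====
-- def separate_symbol_end(data, start_symbol, end_symbol):
--     depth = 1
--     for i in range(len(data) - 2, -1, -1):
--         if data[i] == ["symbol", start_symbol]:
--             depth -= 1
--         elif data[i] == ["symbol", end_symbol]:
--             depth += 1
--         if depth == 0:
--             return data[:i], data[i + 1:len(data) - 1], True
--     return [], data[:len(data) - 1], False
-- ===== Notes on version B (the rewrite author's own statement) =====
-- stated objective: simpler
-- what changed: Replaces A's two-mode accumulator loop (two append lists, an in_end_part flag, and final reversals) with a single backward scan that finds the split index and then returns two slices of the input.
import Mathlib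
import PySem

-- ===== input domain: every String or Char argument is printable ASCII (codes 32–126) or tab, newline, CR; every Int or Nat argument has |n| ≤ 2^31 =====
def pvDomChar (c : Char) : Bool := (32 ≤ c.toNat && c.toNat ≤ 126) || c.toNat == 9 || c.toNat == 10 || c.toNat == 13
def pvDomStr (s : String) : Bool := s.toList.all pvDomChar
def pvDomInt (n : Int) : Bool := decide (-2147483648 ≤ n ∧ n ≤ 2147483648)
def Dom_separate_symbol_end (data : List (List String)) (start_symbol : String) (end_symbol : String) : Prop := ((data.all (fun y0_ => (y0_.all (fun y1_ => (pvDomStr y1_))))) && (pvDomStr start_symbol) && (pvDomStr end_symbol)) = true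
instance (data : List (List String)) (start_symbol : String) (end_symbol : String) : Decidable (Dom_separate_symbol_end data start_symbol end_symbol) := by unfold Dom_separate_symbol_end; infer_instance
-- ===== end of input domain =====

-- B replaces A's two-mode accumulator loop (append + final reversals) by a find-the-split-index
-- backward scan followed by two slices; objective: simpler (same O(n) cost).

-- ===== PORT A =====
-- state = (start_part, end_part, in_end_part, depth)
def sseStep (data : List (List String)) (start_symbol end_symbol : String)
    (acc : List (List String) × List (List String) × Bool × Int) (i : Int) :
    List (List String) × List (List String) × Bool × Int :=
  if acc.2.2.1 then
    let depth1 :=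
      if PySem.List.pyGetD data i [] = ["symbol", start_symbol] then acc.2.2.2 - 1
      else if PySem.List.pyGetD data i [] = ["symbol", end_symbol] then acc.2.2.2 + 1
      else acc.2.2.2
    if depth1 = 0 then (acc.1, acc.2.1, false, depth1)
    else (acc.1, acc.2.1 ++ [PySem.List.pyGetD data i []], true, depth1)
  else (acc.1 ++ [PySem.List.pyGetD data i []], acc.2.1, acc.2.2.1, acc.2.2.2)

def separate_symbol_end (data : List (List String)) (start_symbol : String) (end_symbol : String) : List (List String) × List (List String) × Bool :=
  let st := (PySem.List.pyRange ((data.length : Int) - 2) (-1) (-1)).foldl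
    (sseStep data start_symbol end_symbol) ([], [], true, 1)
  (st.1.reverse, st.2.1.reverse, !st.2.2.1)

-- ===== PORT B =====
def sseNewDepth (data : List (List String)) (start_symbol end_symbol : String) (i depth : Int) : Int :=
  if PySem.List.pyGetD data i [] = ["symbol", start_symbol] then depth - 1
  else if PySem.List.pyGetD data i [] = ["symbol", end_symbol] then depth + 1
  else depth

-- the backward scan of B: first index (in scan order) at which depth reaches 0
def sseFind (data : List (List String)) (start_symbol end_symbol : String) :
    List Int → Int → Option Int
  | [], _ => none
  | i :: rest, depth =>
    let d := sseNewDepth data start_symbol end_symbol i depth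
    if d = 0 then some i else sseFind data start_symbol end_symbol rest d

def separate_symbol_end_alt (data : List (List String)) (start_symbol : String) (end_symbol : String) : List (List String) × List (List String) × Bool :=
  match sseFind data start_symbol end_symbol
      (PySem.List.pyRange ((data.length : Int) - 2) (-1) (-1)) 1 with
  | some i =>
      (PySem.List.slice data none (some i),
       PySem.List.slice data (some (i + 1)) (some ((data.length : Int) - 1)), true)
  | none => ([], PySem.List.slice data none (some ((data.length : Int) - 1)), false)

-- ===== PRECONDITION & SPEC =====
def Spec_separate_symbol_end (data : List (List String)) (start_symbol : String) (end_symbol : String) (out : List (List String) × List (List String) × Bool) : Prop := out = separate_symbol_end_alt data start_symbol end_symbol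
instance (data : List (List String)) (start_symbol : String) (end_symbol : String) (out : List (List String) × List (List String) × Bool) : Decidable (Spec_separate_symbol_end data start_symbol end_symbol out) := by unfold Spec_separate_symbol_end; infer_instance

-- ===== CLAIM (what is proved, stated in full; the proofs are below) =====
def Claim_equal_separate_symbol_end : Prop := ∀ (data : List (List String)) (start_symbol : String) (end_symbol : String), Dom_separate_symbol_end data start_symbol end_symbol → Spec_separate_symbol_end data start_symbol end_symbol (separate_symbol_end data start_symbol end_symbol)

-- ===== LEMMAS AND PROOFS =====

theorem sseStep_false (data : List (List String)) (s e : String)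
    (sp ep : List (List String)) (d i : Int) :
    sseStep data s e (sp, ep, false, d) i = (sp ++ [PySem.List.pyGetD data i []], ep, false, d) := rfl

theorem sseStep_true (data : List (List String)) (s e : String)
    (sp ep : List (List String)) (d i : Int) :
    sseStep data s e (sp, ep, true, d) i =
      if sseNewDepth data s e i d = 0 then (sp, ep, false, 0)
      else (sp, ep ++ [PySem.List.pyGetD data i []], true, sseNewDepth data s e i d) := by
  simp only [sseStep, sseNewDepth]
  split <;> simp_all

theorem sseFind_mem (data : List (List String)) (s e : String) :
    ∀ (L : List Int) (d i : Int), sseFind data s e L d = some i → i ∈ L := by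
  intro L
  induction L with
  | nil => intro d i h; simp [sseFind] at h
  | cons a rest ih =>
      intro d i h
      simp only [sseFind] at h
      split at h
      · simp at h; simp [h]
      · exact List.mem_cons_of_mem _ (ih _ _ h)

-- Phase after the split was found: A only accumulates into start_part
theorem foldl_phase1 (data : List (List String)) (s e : String) :
    ∀ (k : Nat) (a : Int), (a + 1).toNat = k →
    ∀ (sp ep : List (List String)) (d : Int),
      (PySem.List.pyRange a (-1) (-1)).foldl (sseStep data s e) (sp, ep, false, d) =
        (sp ++ (PySem.List.pyRange a (-1) (-1)).map (fun j => PySem.List.pyGetD data j []), ep, false, d) := by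
  intro k
  induction k with
  | zero =>
      intro a ha sp ep d
      have : a ≤ -1 := by omega
      rw [PySem.List.pyRange_neg_one_eq_nil this]
      simp
  | succ n ih =>
      intro a ha sp ep d
      have hlt : (-1 : Int) < a := by omega
      rw [PySem.List.pyRange_neg_one_cons hlt]
      simp only [List.foldl_cons, List.map_cons, sseStep_false]
      rw [ih (a - 1) (by omega)]
      simp

-- Main phase: A's fold from an in_end_part state, characterised by B's sseFind
theorem foldl_phase2 (data : List (List String)) (s e : String) :
    ∀ (k : Nat) (a : Int), (a + 1).toNat = k →
    ∀ (sp ep : List (List String)) (d : Int), d ≠ 0 →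
      (PySem.List.pyRange a (-1) (-1)).foldl (sseStep data s e) (sp, ep, true, d) =
        (match sseFind data s e (PySem.List.pyRange a (-1) (-1)) d with
         | some i =>
             (sp ++ (PySem.List.pyRange (i - 1) (-1) (-1)).map (fun j => PySem.List.pyGetD data j []),
              ep ++ (PySem.List.pyRange a i (-1)).map (fun j => PySem.List.pyGetD data j []), false, 0)
         | none =>
             (sp, ep ++ (PySem.List.pyRange a (-1) (-1)).map (fun j => PySem.List.pyGetD data j []), true,
              (PySem.List.pyRange a (-1) (-1)).foldl (fun dd i => sseNewDepth data s e i dd) d)) := by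
  intro k
  induction k with
  | zero =>
      intro a ha sp ep d hd
      have : a ≤ -1 := by omega
      rw [PySem.List.pyRange_neg_one_eq_nil this]
      simp [sseFind]
  | succ n ih =>
      intro a ha sp ep d hd
      have hlt : (-1 : Int) < a := by omega
      rw [PySem.List.pyRange_neg_one_cons hlt]
      simp only [List.foldl_cons, sseStep_true]
      by_cases h0 : sseNewDepth data s e a d = 0
      · rw [if_pos h0]
        rw [foldl_phase1 data s e ((a - 1 + 1).toNat) (a - 1) rfl]
        simp only [sseFind, h0, if_pos]
        have : PySem.List.pyRange a a (-1) = [] := PySem.List.pyRange_neg_one_eq_nil le_rfl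
        simp [this]
      · rw [if_neg h0]
        rw [ih (a - 1) (by omega) _ _ _ h0]
        simp only [sseFind]
        rw [if_neg h0]
        cases hfind : sseFind data s e (PySem.List.pyRange (a - 1) (-1) (-1)) (sseNewDepth data s e a d) with
        | some i =>
            have hi := sseFind_mem data s e _ _ _ hfind
            rw [PySem.List.mem_pyRange_neg_one] at hi
            have hia : i < a := by omega
            simp only [hfind]
            rw [PySem.List.pyRange_neg_one_cons hia]
            simp
        | none =>
            simp

-- elements of a forward index range as a drop/take slice of data
theorem map_get_range (data : List (List String)) :
    ∀ (b a : Nat), b ≤ data.length →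
      (PySem.List.pyRange (a : Int) (b : Int) 1).map (fun j => PySem.List.pyGetD data j []) =
        (data.drop a).take (b - a) := by
  intro b
  induction b with
  | zero =>
      intro a _
      rw [PySem.List.pyRange_one_eq_nil (by exact_mod_cast Nat.zero_le a)]
      simp
  | succ c ih =>
      intro a hb
      by_cases hac : c + 1 ≤ a
      · rw [PySem.List.pyRange_one_eq_nil (by exact_mod_cast hac)]
        have : c + 1 - a = 0 := by omega
        simp [this]
      · have hle : a ≤ c := by omega
        have hcast : ((c : Int) + 1) = ((c + 1 : Nat) : Int) := by push_cast; ring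
        rw [← hcast, PySem.List.pyRange_one_succ_right (by exact_mod_cast hle)]
        rw [List.map_append, ih a (by omega)]
        have hc : c < data.length := by omega
        have hg : PySem.List.pyGetD data (c : Int) [] = data[c] := by
          rw [PySem.List.pyGetD_natCast]
          simp [List.getD, hc]
        have hsub : c + 1 - a = (c - a) + 1 := by omega
        rw [hsub, List.take_add_one]
        have hdi : (data.drop a)[c - a]? = some data[c] := by
          rw [List.getElem?_drop]
          have : a + (c - a) = c := by omega
          rw [this]
          exact List.getElem?_eq_getElem hc
        simp [hg, hdi]

theorem pyRange_down_map_rev (data : List (List String)) (a b : Int) :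
    (PySem.List.pyRange a b (-1)).map (fun j => PySem.List.pyGetD data j []) =
      ((PySem.List.pyRange (b + 1) (a + 1) 1).map (fun j => PySem.List.pyGetD data j [])).reverse := by
  rw [PySem.List.pyRange_neg_one_eq_reverse, List.map_reverse]

-- ===== VERDICT (by name: the statement is the Claim_ definition above) =====
theorem separate_symbol_end_spec : Claim_equal_separate_symbol_end := by
  intro data s e _
  unfold Spec_separate_symbol_end separate_symbol_end separate_symbol_end_alt
  rw [foldl_phase2 data s e (((data.length : Int) - 2) + 1).toNat _ rfl _ _ 1 (by norm_num)]
  cases hfind : sseFind data s e (PySem.List.pyRange ((data.length : Int) - 2) (-1) (-1)) 1 with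
  | some i =>
      have hi := sseFind_mem data s e _ _ _ hfind
      rw [PySem.List.mem_pyRange_neg_one] at hi
      have h0i : 0 ≤ i := by omega
      have hn2 : 2 ≤ (data.length : Int) := by omega
      obtain ⟨hi1, hi2⟩ := hi
      have hn2 : 2 ≤ data.length := by omega
      have h1 : (List.map (fun j => PySem.List.pyGetD data j []) (PySem.List.pyRange (i - 1) (-1) (-1))).reverse
          = PySem.List.slice data none (some i) := by
        rw [pyRange_down_map_rev, List.reverse_reverse]
        have ha : (-1 : Int) + 1 = ((0 : Nat) : Int) := by norm_num
        have hb : i - 1 + 1 = ((i.toNat : Nat) : Int) := by omega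
        rw [ha, hb, map_get_range data i.toNat 0 (by omega)]
        rw [PySem.List.slice_to data h0i]
        simp
      have h2 : (List.map (fun j => PySem.List.pyGetD data j []) (PySem.List.pyRange ((data.length : Int) - 2) i (-1))).reverse
          = PySem.List.slice data (some (i + 1)) (some ((data.length : Int) - 1)) := by
        rw [pyRange_down_map_rev, List.reverse_reverse]
        have ha : i + 1 = ((i.toNat + 1 : Nat) : Int) := by omega
        have hb : (data.length : Int) - 2 + 1 = ((data.length - 1 : Nat) : Int) := by omega
        rw [ha, hb, map_get_range data (data.length - 1) (i.toNat + 1) (by omega)]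
        rw [PySem.List.slice_toNat data (by omega) (by omega)]
        congr 1
        omega
      simp only [List.nil_append]
      rw [h1, h2]
      simp
  | none =>
      simp only [List.nil_append, List.reverse_nil]
      rw [pyRange_down_map_rev, List.reverse_reverse]
      by_cases hn : data.length = 0
      · have hdata : data = [] := List.eq_nil_of_length_eq_zero hn
        subst hdata
        rw [PySem.List.pyRange_one_eq_nil (by norm_num)]
        simp [PySem.List.slice]
      · have ha : (-1 : Int) + 1 = ((0 : Nat) : Int) := by norm_num
        have hb : (data.length : Int) - 2 + 1 = ((data.length - 1 : Nat) : Int) := by omega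
        have hb' : (data.length : Int) - 1 = ((data.length - 1 : Nat) : Int) := by omega
        rw [ha, hb, map_get_range data (data.length - 1) 0 (by omega)]
        rw [hb', PySem.List.slice_to_natCast]
        simp
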